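-- pv_equiv track=rewrite | github.com/VitusPuttmann/advent-code-2024 | src/advent_code_2024/day_07.py | calculate_outcomes
-- ===== SOURCE A (Python) =====
-- def calculate_outcomes(int_list: list[int], concat: bool = False):
--     """ Calculate all potential outcomes of sequentially combining the values
--         of a list via addition or multiplication or via the addition of
--         concatenation. """
--
--     if concat == False:
--         outcomes_list = [int_list.pop(0)]
--         for val in int_list:
--             addition_list = [x + val for x in outcomes_list]
--             multiplication_list = [x * val for x in outcomes_list]
--             outcomes_list = addition_list + multiplication_list
--
--     if concat == True:
--         outcomes_list = [int_list.pop(0)]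
--         for val in int_list:
--             addition_list = [x + val for x in outcomes_list]
--             multiplication_list = [x * val for x in outcomes_list]
--             concatenation_list = [
--                 int(str(x)+str(val)) for x in outcomes_list
--             ]
--             outcomes_list = (
--                 addition_list + multiplication_list + concatenation_list
--             )
--
--     return outcomes_list
-- ===== SOURCE B (Python) =====
-- def calculate_outcomes(int_list: list[int], concat: bool = False):
--     """ Calculate all potential outcomes of sequentially combining the values
--         of a list via addition or multiplication or via the addition of
--         concatenation. """
--
--     head = int_list.pop(0)
--     base = 3 if concat == True else 2
--     outcomes_list = []
--     for i in range(base ** len(int_list)):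
--         result = head
--         n = i
--         for val in int_list:
--             d = n % base
--             n //= base
--             if d == 0:
--                 result = result + val
--             elif d == 1:
--                 result = result * val
--             else:
--                 result = int(str(result) + str(val))
--         outcomes_list.append(result)
--     return outcomes_list
-- ===== Notes on version B (the rewrite author's own statement) =====
-- stated objective: alternative
-- what changed: Replaces A's list-doubling fold (each step maps the whole outcome list under +, *, concat and concatenates the blocks) by direct enumeration: for each operator combination i in range(base**len(rest)) decode i's base-`base` digits (least significant = first value's operator) and fold the chosen operators over the values, producing the identical order in one pass per combination.
import Mathlib
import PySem

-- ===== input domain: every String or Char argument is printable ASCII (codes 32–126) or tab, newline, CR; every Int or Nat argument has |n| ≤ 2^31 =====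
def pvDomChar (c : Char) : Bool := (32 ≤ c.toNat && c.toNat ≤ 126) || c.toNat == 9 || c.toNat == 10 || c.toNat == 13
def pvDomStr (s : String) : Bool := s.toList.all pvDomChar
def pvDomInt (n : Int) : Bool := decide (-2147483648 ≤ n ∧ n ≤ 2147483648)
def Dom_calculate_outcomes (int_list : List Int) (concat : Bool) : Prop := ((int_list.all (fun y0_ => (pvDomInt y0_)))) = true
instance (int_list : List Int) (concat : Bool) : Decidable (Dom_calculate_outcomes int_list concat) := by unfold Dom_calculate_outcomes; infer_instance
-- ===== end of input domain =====

-- B enumerates operator combinations by index and decodes base-`base` digits instead of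
-- rebuilding the whole outcome list at every value (alternative decomposition, same order).
-- Both A and B pop the first element of int_list in place (same mutation); the equivalence
-- proved here is about the return value.

-- ===== PORT A =====
-- int(str(x) + str(val)); Python raises ValueError when val < 0 (excluded by Pre_): the port
-- returns the .getD 0 default there. Exact via PySem.Int.ofChars?/toChars on the parsing side.
def pvIntConcat (x val : Int) : Int :=
  (PySem.Int.ofChars? (PySem.Int.toChars x ++ PySem.Int.toChars val)).getD 0

def calculate_outcomes (int_list : List Int) (concat : Bool) : List Int :=
  if concat = false then
    match int_list with
    | [] => []   -- Python raises IndexError on pop(0) of an empty list (excluded by Pre_)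
    | h :: rest =>
      rest.foldl (fun outcomes val =>
        outcomes.map (fun x => x + val) ++ outcomes.map (fun x => x * val)) [h]
  else
    match int_list with
    | [] => []   -- Python raises IndexError (excluded by Pre_)
    | h :: rest =>
      rest.foldl (fun outcomes val =>
        outcomes.map (fun x => x + val) ++ outcomes.map (fun x => x * val)
          ++ outcomes.map (fun x => pvIntConcat x val)) [h]

-- ===== PORT B =====
-- inner loop of Source B: fold over the remaining values carrying (result, n)
def pvApplyOps (base : Int) (head : Int) (rest : List Int) (i : Int) : Int :=
  (rest.foldl (fun (p : Int × Int) val =>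
      let d := PySem.Int.mod p.2 base
      let n := PySem.Int.floordiv p.2 base
      ((if d = 0 then p.1 + val else if d = 1 then p.1 * val else pvIntConcat p.1 val), n))
    (head, i)).1

def calculate_outcomes_alt (int_list : List Int) (concat : Bool) : List Int :=
  match int_list with
  | [] => []   -- Source B raises IndexError on pop(0) of an empty list (excluded by Pre_)
  | head :: rest =>
    let base : Int := if concat = true then 3 else 2
    (PySem.List.pyRange 0 (base ^ rest.length) 1).foldl
      (fun acc i => acc ++ [pvApplyOps base head rest i]) []

-- ===== PRECONDITION & SPEC =====
-- Pre_ excludes exactly the inputs where the Pythons raise: the empty list (IndexError from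
-- pop(0)) and, with concat, a negative value after the first (int(str(x)+str(val)) is a
-- ValueError since str(val) carries a '-').  B raises identically there.
def Pre_calculate_outcomes (int_list : List Int) (concat : Bool) : Prop :=
  int_list ≠ [] ∧ (concat = true → ∀ x ∈ int_list.tail, 0 ≤ x)
instance (int_list : List Int) (concat : Bool) : Decidable (Pre_calculate_outcomes int_list concat) := by
  unfold Pre_calculate_outcomes; infer_instance

def pvWitness_calculate_outcomes : List Int × Bool := ([1, 2, 3], true)

def Spec_calculate_outcomes (int_list : List Int) (concat : Bool) (out : List Int) : Prop := out = calculate_outcomes_alt int_list concat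
instance (int_list : List Int) (concat : Bool) (out : List Int) : Decidable (Spec_calculate_outcomes int_list concat out) := by unfold Spec_calculate_outcomes; infer_instance

-- ===== CLAIM (what is proved, stated in full; the proofs are below) =====
def Claim_equal_calculate_outcomes : Prop := ∀ (int_list : List Int) (concat : Bool), Dom_calculate_outcomes int_list concat → Pre_calculate_outcomes int_list concat → Spec_calculate_outcomes int_list concat (calculate_outcomes int_list concat)

-- ===== LEMMAS AND PROOFS =====

-- the operator selected by digit d
def pvOp (d : Nat) (x v : Int) : Int :=
  if d = 0 then x + v else if d = 1 then x * v else pvIntConcat x v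

-- A's result characterised: element number D, read as base-b digits, least significant digit
-- = the operator applied with the first remaining value
def pvDecode (b : Nat) (rest : List Int) (D : Nat) (x : Int) : Int :=
  match rest with
  | [] => x
  | v :: vs => pvDecode b vs (D / b) (pvOp (D % b) x v)

lemma pvRange_mul_flatMap {α : Type} (b : Nat) (f : Nat → List α) :
    ∀ a : Nat, (List.range (a * b)).flatMap f
      = (List.range a).flatMap (fun u => (List.range b).flatMap (fun d => f (u * b + d))) := by
  intro a
  induction a with
  | zero => simp
  | succ a ih =>
      rw [Nat.succ_mul, List.range_add, List.range_add]
      simp [List.flatMap_append, ih, List.flatMap_map, Nat.add_comm]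

lemma pvDecode_split (b : Nat) (hb : 0 < b) (vs : List Int) (v : Int) (u d : Nat) (hd : d < b)
    (x : Int) : pvDecode b (v :: vs) (u * b + d) x = pvDecode b vs u (pvOp d x v) := by
  have h1 : (u * b + d) % b = d := by
    rw [Nat.add_comm, Nat.add_mul_mod_self_right]; exact Nat.mod_eq_of_lt hd
  have h2 : (u * b + d) / b = u := by
    rw [Nat.add_comm, Nat.add_mul_div_right _ _ hb, Nat.div_eq_of_lt hd]; simp
  simp [pvDecode, h1, h2]

lemma pvFold_eq_flatMap (b : Nat) (hb : 0 < b)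
    (step : List Int → Int → List Int)
    (hstep : ∀ (L : List Int) (v : Int),
      step L v = (List.range b).flatMap (fun d => L.map (fun x => pvOp d x v))) :
    ∀ (rest : List Int) (L : List Int),
      rest.foldl step L
        = (List.range (b ^ rest.length)).flatMap (fun D => L.map (fun x => pvDecode b rest D x)) := by
  intro rest
  induction rest with
  | nil => intro L; simp [pvDecode]
  | cons v vs ih =>
      intro L
      rw [List.foldl_cons, ih, List.length_cons, pow_succ, pvRange_mul_flatMap]
      refine List.flatMap_congr (fun u _ => ?_)
      rw [hstep, List.map_flatMap]
      refine List.flatMap_congr (fun d hd => ?_)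
      rw [List.map_map]
      refine List.map_congr_left (fun x _ => ?_)
      exact (pvDecode_split b hb vs v u d (List.mem_range.mp hd) x).symm

lemma pvApplyOps_eq (b : Nat) (rest : List Int) :
    ∀ (D : Nat) (x : Int),
      pvApplyOps (b : Int) x rest (D : Int) = pvDecode b rest D x := by
  induction rest with
  | nil => intro D x; simp [pvApplyOps, pvDecode]
  | cons v vs ih =>
      intro D x
      have h : pvApplyOps (b : Int) x (v :: vs) (D : Int)
          = pvApplyOps (b : Int)
              (if PySem.Int.mod (D : Int) (b : Int) = 0 then x + v
               else if PySem.Int.mod (D : Int) (b : Int) = 1 then x * v else pvIntConcat x v)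
              vs (PySem.Int.floordiv (D : Int) (b : Int)) := rfl
      rw [h, PySem.Int.mod_natCast, PySem.Int.floordiv_natCast, ih,
        show pvDecode b (v :: vs) D x = pvDecode b vs (D / b) (pvOp (D % b) x v) from rfl]
      congr 1
      simp only [pvOp, Nat.cast_eq_zero, Nat.cast_eq_one]

lemma pvAlt_eq_map (b : Nat) (head : Int) (rest : List Int) :
    (PySem.List.pyRange 0 ((b : Int) ^ rest.length) 1).foldl
        (fun acc i => acc ++ [pvApplyOps (b : Int) head rest i]) []
      = (List.range (b ^ rest.length)).map (fun D => pvDecode b rest D head) := by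
  have hcast : ((b : Int)) ^ rest.length = ((b ^ rest.length : Nat) : Int) := by push_cast; ring
  rw [hcast, PySem.List.pyRange_zero_natCast, PySem.List.foldl_append_singleton_eq_map,
    List.map_map]
  exact List.map_congr_left (fun D _ => pvApplyOps_eq b rest D head)

lemma pvStep_two (L : List Int) (v : Int) :
    L.map (fun x => x + v) ++ L.map (fun x => x * v)
      = (List.range 2).flatMap (fun d => L.map (fun x => pvOp d x v)) := by
  simp [List.range_succ, pvOp]

lemma pvStep_three (L : List Int) (v : Int) :
    L.map (fun x => x + v) ++ L.map (fun x => x * v) ++ L.map (fun x => pvIntConcat x v)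
      = (List.range 3).flatMap (fun d => L.map (fun x => pvOp d x v)) := by
  simp [List.range_succ, pvOp]

-- ===== VERDICT (by name: the statement is the Claim_ definition above) =====
theorem calculate_outcomes_spec : Claim_equal_calculate_outcomes := by
  intro int_list concat _ hpre
  unfold Spec_calculate_outcomes
  match int_list with
  | [] => exact absurd rfl hpre.1
  | h :: rest =>
    cases concat with
    | false =>
        show (rest.foldl (fun outcomes val =>
            outcomes.map (fun x => x + val) ++ outcomes.map (fun x => x * val)) [h]) = _
        rw [pvFold_eq_flatMap 2 (by norm_num) _ pvStep_two rest [h]]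
        have : calculate_outcomes_alt (h :: rest) false
            = (List.range (2 ^ rest.length)).map (fun D => pvDecode 2 rest D h) := by
          show (PySem.List.pyRange 0 ((2 : Int) ^ rest.length) 1).foldl
              (fun acc i => acc ++ [pvApplyOps (2 : Int) h rest i]) [] = _
          exact_mod_cast pvAlt_eq_map 2 h rest
        rw [this]
        exact Eq.symm List.map_eq_flatMap
    | true =>
        show (rest.foldl (fun outcomes val =>
            outcomes.map (fun x => x + val) ++ outcomes.map (fun x => x * val)
              ++ outcomes.map (fun x => pvIntConcat x val)) [h]) = _
        rw [pvFold_eq_flatMap 3 (by norm_num) _ pvStep_three rest [h]]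
        have : calculate_outcomes_alt (h :: rest) true
            = (List.range (3 ^ rest.length)).map (fun D => pvDecode 3 rest D h) := by
          show (PySem.List.pyRange 0 ((3 : Int) ^ rest.length) 1).foldl
              (fun acc i => acc ++ [pvApplyOps (3 : Int) h rest i]) [] = _
          exact_mod_cast pvAlt_eq_map 3 h rest
        rw [this]
        exact Eq.symm List.map_eq_flatMap
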